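-- pv_equiv track=rewrite | github.com/IslamTayeb/spotify-clustering | tools/deduplicate_songs.py | select_best_track
-- ===== SOURCE A (Python) =====
-- from typing import Dict, List, Tuple
--
-- def select_best_track(duplicates: List[Dict]) -> Tuple[Dict, List[Dict]]:
--     """
--     Select the best track from duplicates.
--     Priority:
--     1. Has both MP3 and lyrics
--     2. Has MP3 only
--     3. Has lyrics only
--     4. Neither
--     """
--
--     scored = []
--     for track in duplicates:
--         score = 0
--         if track.get("mp3_file"):
--             score += 2
--         if track.get("lyrics_file"):
--             score += 1
--         scored.append((score, track))
--
--     scored.sort(key=lambda x: x[0], reverse=True)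
--
--     best = scored[0][1]
--     to_remove = [item[1] for item in scored[1:]]
--
--     return best, to_remove
-- ===== SOURCE B (Python) =====
-- from typing import Dict, List, Tuple
--
-- def select_best_track(duplicates: List[Dict]) -> Tuple[Dict, List[Dict]]:
--     # Bucket by the 4 possible scores (counting sort), preserving insertion order.
--     buckets = ([], [], [], [])
--     for track in duplicates:
--         score = (2 if track.get("mp3_file") else 0) + (1 if track.get("lyrics_file") else 0)
--         buckets[3 - score].append(track)
--     ordered = [t for b in buckets for t in b]
--     return ordered[0], ordered[1:]
-- ===== Notes on version B (the rewrite author's own statement) =====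
-- stated objective: alternative
-- what changed: replaces build-score-pairs-then-stable-sort with a single-pass bucket (counting) sort over the 4 possible scores, preserving insertion order
import Mathlib
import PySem

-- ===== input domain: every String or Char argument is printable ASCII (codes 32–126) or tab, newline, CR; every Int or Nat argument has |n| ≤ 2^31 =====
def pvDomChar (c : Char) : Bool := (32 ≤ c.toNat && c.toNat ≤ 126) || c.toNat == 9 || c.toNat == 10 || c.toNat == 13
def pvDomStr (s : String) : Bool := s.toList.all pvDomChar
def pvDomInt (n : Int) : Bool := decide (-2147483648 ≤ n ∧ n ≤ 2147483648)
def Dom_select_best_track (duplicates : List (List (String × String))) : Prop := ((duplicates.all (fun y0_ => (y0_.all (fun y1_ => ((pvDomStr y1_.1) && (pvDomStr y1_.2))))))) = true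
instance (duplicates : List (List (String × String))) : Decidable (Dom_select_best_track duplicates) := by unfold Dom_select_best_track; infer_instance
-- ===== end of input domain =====

-- B replaces build-pairs-then-stable-sort with a one-pass bucket (counting) sort over the 4 possible
-- scores, preserving insertion order (objective: alternative algorithm; not measured faster).

-- truthiness of d.get(k): None and "" are falsy, any other string truthy
def pvTruthy (o : Option String) : Bool :=
  match o with
  | none => false
  | some s => !s.toList.isEmpty

-- ===== PORT A =====
-- A's in-loop score accumulation (score = 0; if …: score += 2; if …: score += 1), named for readability
def scoreA (track : List (String × String)) : Int :=
  let score : Int := 0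
  let score := if pvTruthy (track.lookup "mp3_file") then score + 2 else score
  let score := if pvTruthy (track.lookup "lyrics_file") then score + 1 else score
  score

def select_best_track (duplicates : List (List (String × String))) : (List (String × String)) × (List (List (String × String))) :=
  let scored := duplicates.foldl (fun acc track => acc ++ [(scoreA track, track)]) []
  let scoredSorted := PySem.List.sorted scored (fun x => x.1) true
  match PySem.List.pyGet? scoredSorted 0 with
  | none => ([], [])  -- scored[0] raises IndexError in Python; excluded by Pre_
  | some best => (best.2, (PySem.List.slice scoredSorted (some 1) none).map (fun item => item.2))

-- ===== PORT B =====
def scoreB (track : List (String × String)) : Int :=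
  (if pvTruthy (track.lookup "mp3_file") then 2 else 0) +
  (if pvTruthy (track.lookup "lyrics_file") then 1 else 0)

-- the loop body: appends track to the bucket for its score (buckets[3-score].append(track))
def bucketStep (b : List (List (String × String)) × List (List (String × String)) × List (List (String × String)) × List (List (String × String))) (track : List (String × String)) :
    List (List (String × String)) × List (List (String × String)) × List (List (String × String)) × List (List (String × String)) :=
  let s := scoreB track
  if s == 3 then (b.1 ++ [track], b.2.1, b.2.2.1, b.2.2.2)
  else if s == 2 then (b.1, b.2.1 ++ [track], b.2.2.1, b.2.2.2)
  else if s == 1 then (b.1, b.2.1, b.2.2.1 ++ [track], b.2.2.2)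
  else (b.1, b.2.1, b.2.2.1, b.2.2.2 ++ [track])

def select_best_track_alt (duplicates : List (List (String × String))) : (List (String × String)) × (List (List (String × String))) :=
  let buckets := duplicates.foldl bucketStep ([], [], [], [])
  let ordered := buckets.1 ++ buckets.2.1 ++ buckets.2.2.1 ++ buckets.2.2.2
  match ordered with
  | [] => ([], [])  -- ordered[0] raises IndexError in Python; excluded by Pre_
  | best :: rest => (best, rest)

-- ===== PRECONDITION & SPEC =====
-- Pre_ excludes only the empty list, on which both Pythons raise IndexError.
def Pre_select_best_track (duplicates : List (List (String × String))) : Prop := duplicates ≠ []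
instance (duplicates : List (List (String × String))) : Decidable (Pre_select_best_track duplicates) := by unfold Pre_select_best_track; infer_instance

def pvWitness_select_best_track : (List (List (String × String))) := [[("mp3_file", "a.mp3")], [("lyrics_file", "l.txt")]]

def Spec_select_best_track (duplicates : List (List (String × String))) (out : (List (String × String)) × (List (List (String × String)))) : Prop := out = select_best_track_alt duplicates
instance (duplicates : List (List (String × String))) (out : (List (String × String)) × (List (List (String × String)))) : Decidable (Spec_select_best_track duplicates out) := by unfold Spec_select_best_track; infer_instance

-- ===== CLAIM (what is proved, stated in full; the proofs are below) =====
def Claim_equal_select_best_track : Prop := ∀ (duplicates : List (List (String × String))), Dom_select_best_track duplicates → Pre_select_best_track duplicates → Spec_select_best_track duplicates (select_best_track duplicates)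

-- ===== LEMMAS AND PROOFS =====

theorem scoreA_eq_scoreB (t : List (String × String)) : scoreA t = scoreB t := by
  unfold scoreA scoreB
  cases pvTruthy (t.lookup "mp3_file") <;> cases pvTruthy (t.lookup "lyrics_file") <;> simp

theorem scoreB_range (t : List (String × String)) :
    scoreB t = 0 ∨ scoreB t = 1 ∨ scoreB t = 2 ∨ scoreB t = 3 := by
  unfold scoreB
  cases pvTruthy (t.lookup "mp3_file") <;> cases pvTruthy (t.lookup "lyrics_file") <;> simp

theorem insertBy_eq_cons {α : Type} (before : α → α → Bool) (x b : α) (B : List α) :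
    PySem.List.insertBy before x (b :: B) =
      if before x b then x :: b :: B else b :: PySem.List.insertBy before x B := by
  rw [PySem.List.insertBy]

theorem insertBy_nil {α : Type} (before : α → α → Bool) (x : α) :
    PySem.List.insertBy before x [] = [x] := rfl

theorem insertBy_append_left {α : Type} (before : α → α → Bool) (x : α) (A B : List α)
    (h : ∀ a ∈ A, before x a = false) :
    PySem.List.insertBy before x (A ++ B) = A ++ PySem.List.insertBy before x B := by
  induction A with
  | nil => simp
  | cons a A ih =>
      have ha : before x a = false := h a (by simp)
      rw [List.cons_append, insertBy_eq_cons, ha, ih (fun a ha' => h a (by simp [ha']))]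
      simp

theorem insertBy_cons_of_all {α : Type} (before : α → α → Bool) (x : α) (B : List α)
    (h : ∀ b ∈ B, before x b = true) :
    PySem.List.insertBy before x B = x :: B := by
  cases B with
  | nil => rfl
  | cons b B' => rw [insertBy_eq_cons, h b (by simp)]; simp

-- the key-1 filter buckets of a (Int × α) list
def filt {α : Type} (k : Int) (xs : List (Int × α)) : List (Int × α) :=
  xs.filter (fun p => p.1 == k)

theorem mem_filt {α : Type} {k : Int} {xs : List (Int × α)} {p : Int × α}
    (h : p ∈ filt k xs) : p.1 = k := by
  have := (List.mem_filter.mp h).2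
  simpa using this

-- descending stable sort of a list whose keys all lie in {0,1,2,3} is the bucket concatenation
theorem sorted_rev_buckets {α : Type} (xs : List (Int × α))
    (h : ∀ p ∈ xs, p.1 = 0 ∨ p.1 = 1 ∨ p.1 = 2 ∨ p.1 = 3) :
    PySem.List.sorted xs (fun p => p.1) true =
      filt 3 xs ++ filt 2 xs ++ filt 1 xs ++ filt 0 xs := by
  rw [PySem.List.sorted_rev_eq_foldl_insertBy]
  induction xs using List.reverseRecOn with
  | nil => simp [filt]
  | append_singleton xs x ih =>
      have hxs : ∀ p ∈ xs, p.1 = 0 ∨ p.1 = 1 ∨ p.1 = 2 ∨ p.1 = 3 :=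
        fun p hp => h p (by simp [hp])
      have hx : x.1 = 0 ∨ x.1 = 1 ∨ x.1 = 2 ∨ x.1 = 3 := h x (by simp)
      rw [List.foldl_append, ih hxs]
      simp only [List.foldl_cons, List.foldl_nil]
      have hf3 : filt 3 (xs ++ [x]) = filt 3 xs ++ filt 3 [x] := by simp [filt]
      have hf2 : filt 2 (xs ++ [x]) = filt 2 xs ++ filt 2 [x] := by simp [filt]
      have hf1 : filt 1 (xs ++ [x]) = filt 1 xs ++ filt 1 [x] := by simp [filt]
      have hf0 : filt 0 (xs ++ [x]) = filt 0 xs ++ filt 0 [x] := by simp [filt]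
      rcases hx with hx | hx | hx | hx
      · -- key 0: goes past everything
        rw [show filt 3 xs ++ filt 2 xs ++ filt 1 xs ++ filt 0 xs
              = (filt 3 xs ++ filt 2 xs ++ filt 1 xs ++ filt 0 xs) ++ ([] : List (Int × α)) by simp]
        rw [insertBy_append_left _ _ _ _ ?_]
        · simp [filt, hx, insertBy_nil]
        · intro a ha
          simp only [List.mem_append] at ha
          rcases ha with ((ha | ha) | ha) | ha <;>
            first
            | (have := mem_filt ha; simp [hx, this])
            | (have := mem_filt ha; simp [hx, this])
      · -- key 1
        rw [show filt 3 xs ++ filt 2 xs ++ filt 1 xs ++ filt 0 xs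
              = (filt 3 xs ++ filt 2 xs ++ filt 1 xs) ++ filt 0 xs by simp]
        rw [insertBy_append_left _ _ _ _ ?_, insertBy_cons_of_all _ _ _ ?_]
        · simp [hf3, hf2, hf1, hf0, filt, hx]
        · intro b hb; have := mem_filt hb; simp [hx, this]
        · intro a ha
          simp only [List.mem_append] at ha
          rcases ha with (ha | ha) | ha <;> (have := mem_filt ha; simp [hx, this])
      · -- key 2
        rw [show filt 3 xs ++ filt 2 xs ++ filt 1 xs ++ filt 0 xs
              = (filt 3 xs ++ filt 2 xs) ++ (filt 1 xs ++ filt 0 xs) by simp]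
        rw [insertBy_append_left _ _ _ _ ?_, insertBy_cons_of_all _ _ _ ?_]
        · simp [hf3, hf2, hf1, hf0, filt, hx]
        · intro b hb
          simp only [List.mem_append] at hb
          rcases hb with hb | hb <;> (have := mem_filt hb; simp [hx, this])
        · intro a ha
          simp only [List.mem_append] at ha
          rcases ha with ha | ha <;> (have := mem_filt ha; simp [hx, this])
      · -- key 3: goes past its own bucket only
        rw [show filt 3 xs ++ filt 2 xs ++ filt 1 xs ++ filt 0 xs
              = filt 3 xs ++ (filt 2 xs ++ filt 1 xs ++ filt 0 xs) by simp]
        rw [insertBy_append_left _ _ _ _ ?_, insertBy_cons_of_all _ _ _ ?_]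
        · simp [hf3, hf2, hf1, hf0, filt, hx]
        · intro b hb
          simp only [List.mem_append] at hb
          rcases hb with (hb | hb) | hb <;> (have := mem_filt hb; simp [hx, this])
        · intro a ha; have := mem_filt ha; simp [hx, this]

-- B's bucket fold, characterised
theorem bucket_fold (l : List (List (String × String)))
    (b3 b2 b1 b0 : List (List (String × String))) :
    l.foldl bucketStep (b3, b2, b1, b0) =
      (b3 ++ l.filter (fun t => scoreB t == 3), b2 ++ l.filter (fun t => scoreB t == 2),
       b1 ++ l.filter (fun t => scoreB t == 1), b0 ++ l.filter (fun t => scoreB t == 0)) := by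
  induction l generalizing b3 b2 b1 b0 with
  | nil => simp
  | cons t l ih =>
      rw [List.foldl_cons]
      rcases scoreB_range t with hs | hs | hs | hs
      · rw [show bucketStep (b3, b2, b1, b0) t = (b3, b2, b1, b0 ++ [t]) by
          simp [bucketStep, hs], ih]
        simp [hs]
      · rw [show bucketStep (b3, b2, b1, b0) t = (b3, b2, b1 ++ [t], b0) by
          simp [bucketStep, hs], ih]
        simp [hs]
      · rw [show bucketStep (b3, b2, b1, b0) t = (b3, b2 ++ [t], b1, b0) by
          simp [bucketStep, hs], ih]
        simp [hs]
      · rw [show bucketStep (b3, b2, b1, b0) t = (b3 ++ [t], b2, b1, b0) by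
          simp [bucketStep, hs], ih]
        simp [hs]

-- scored = [(score(t), t) for t in l]: bucketing the pairs is bucketing the tracks
theorem filt_map (k : Int) (l : List (List (String × String))) :
    filt k (l.map (fun t => (scoreB t, t))) =
      (l.filter (fun t => scoreB t == k)).map (fun t => (scoreB t, t)) := by
  simp only [filt, List.filter_map]
  rfl

-- ===== VERDICT (by name: the statement is the Claim_ definition above) =====
theorem select_best_track_spec : Claim_equal_select_best_track := by
  intro dups _ hpre
  unfold Spec_select_best_track select_best_track select_best_track_alt
  rw [PySem.List.foldl_append_singleton_eq_map
    (f := fun track => ((scoreA track, track) : Int × List (String × String))), List.nil_append]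
  have hmap : dups.map (fun track => ((scoreA track, track) : Int × List (String × String)))
      = dups.map (fun track => (scoreB track, track)) :=
    List.map_congr_left (fun t _ => by rw [scoreA_eq_scoreB])
  rw [hmap, bucket_fold]
  have hsorted :
      PySem.List.sorted (dups.map (fun track => (scoreB track, track))) (fun x => x.1) true
        = ((dups.filter (fun t => scoreB t == 3) ++ dups.filter (fun t => scoreB t == 2)
            ++ dups.filter (fun t => scoreB t == 1) ++ dups.filter (fun t => scoreB t == 0)).map
            (fun track => (scoreB track, track))) := by
    rw [sorted_rev_buckets _ ?_]
    · rw [filt_map, filt_map, filt_map, filt_map]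
      simp [List.map_append]
    · intro p hp
      simp only [List.mem_map] at hp
      obtain ⟨t, _, rfl⟩ := hp
      exact scoreB_range t
  dsimp only
  rw [hsorted]
  simp only [List.nil_append]
  cases hGc : dups.filter (fun t => scoreB t == 3) ++ dups.filter (fun t => scoreB t == 2)
      ++ dups.filter (fun t => scoreB t == 1) ++ dups.filter (fun t => scoreB t == 0) with
  | nil =>
      exfalso
      have : dups.map (fun track => ((scoreB track, track) : Int × List (String × String))) = [] := by
        have h0 := hsorted
        rw [hGc] at h0
        simpa [PySem.List.sorted_eq_nil_iff] using h0
      simp at this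
      exact hpre this
  | cons g G' =>
      simp only [List.map_cons]
      rw [PySem.List.slice_from _ (by norm_num : (0:Int) ≤ 1)]
      simp [PySem.List.pyGet?, PySem.List.pyIdx?]
      exact (List.map_congr_left fun t _ => rfl).trans (List.map_id G')
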